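-- pv_equiv track=rewrite | github.com/xile42/leetcode | python3/848. 字母移位.py | diff_accumulate
-- ===== SOURCE A (Python) =====
-- from typing import List, Tuple
--
-- def diff_accumulate(n: int, lrws: List[Tuple[int, int, int]]) -> List[int]:
--
--     diff = [0] * (n + 1)  # 默认下标从0开始(对应l, r)
--
--     for l, r, w in lrws:
--         diff[l] += w
--         diff[r + 1] -= w
--
--     ans = list()
--     cur = 0
--     for i in range(n):
--         cur += diff[i]
--         ans.append(cur)
--
--     return ans  # 默认返回长度n
-- ===== SOURCE B (Python) =====
-- from typing import List, Tuple
--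
-- def diff_accumulate(n: int, lrws: List[Tuple[int, int, int]]) -> List[int]:
--     deltas = [0] * (n + 1)
--     for l, _, w in lrws:
--         deltas[l] += w
--     for _, r, w in lrws:
--         deltas[r + 1] -= w
--     return [sum(deltas[:i + 1]) for i in range(n)]
-- ===== Notes on version B (the rewrite author's own statement) =====
-- stated objective: alternative
-- what changed: Keeps a difference list but splits the combined write loop into two independent passes (all range starts, then all range ends; addition commutes so order is irrelevant) and replaces the stateful accumulate-and-append pass with a direct per-prefix slice-sum comprehension, trading the running accumulator for naive quadratic prefix summation.
import Mathlib
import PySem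

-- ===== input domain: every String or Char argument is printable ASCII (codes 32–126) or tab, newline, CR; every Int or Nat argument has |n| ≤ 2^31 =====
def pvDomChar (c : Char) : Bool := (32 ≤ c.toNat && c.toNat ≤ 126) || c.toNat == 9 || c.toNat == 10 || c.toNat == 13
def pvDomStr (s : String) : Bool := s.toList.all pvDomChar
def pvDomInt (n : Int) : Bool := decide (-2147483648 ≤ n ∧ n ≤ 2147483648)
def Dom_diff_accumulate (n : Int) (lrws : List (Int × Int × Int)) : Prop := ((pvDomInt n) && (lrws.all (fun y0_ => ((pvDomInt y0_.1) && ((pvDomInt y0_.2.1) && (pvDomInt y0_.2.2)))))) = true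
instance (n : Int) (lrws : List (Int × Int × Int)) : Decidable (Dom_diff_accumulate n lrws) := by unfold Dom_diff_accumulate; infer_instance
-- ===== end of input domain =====

-- B keeps a difference list but does two independent write passes (starts, then ends) and
-- reads each answer as a direct per-prefix slice sum instead of a running accumulator.


-- ===== PORT A =====
def diff_accumulate (n : Int) (lrws : List (Int × Int × Int)) : List Int :=
  let diff0 : List Int := List.replicate (n + 1).toNat 0
  let diff := lrws.foldl (fun diff t =>
    let d1 := PySem.List.pySetD diff t.1 (PySem.List.pyGetD diff t.1 0 + t.2.2)
    PySem.List.pySetD d1 (t.2.1 + 1) (PySem.List.pyGetD d1 (t.2.1 + 1) 0 - t.2.2)) diff0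
  ((PySem.List.pyRange 0 n).foldl (fun (s : List Int × Int) i =>
    let cur := s.2 + PySem.List.pyGetD diff i 0
    (s.1 ++ [cur], cur)) ([], 0)).1

-- ===== PORT B =====
def diff_accumulate_alt (n : Int) (lrws : List (Int × Int × Int)) : List Int :=
  let deltas0 : List Int := List.replicate (n + 1).toNat 0
  let deltas1 := lrws.foldl (fun ds t =>
    PySem.List.pySetD ds t.1 (PySem.List.pyGetD ds t.1 0 + t.2.2)) deltas0
  let deltas2 := lrws.foldl (fun ds t =>
    PySem.List.pySetD ds (t.2.1 + 1) (PySem.List.pyGetD ds (t.2.1 + 1) 0 - t.2.2)) deltas1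
  (PySem.List.pyRange 0 n).map (fun i => (PySem.List.slice deltas2 none (some (i + 1))).sum)

-- ===== PRECONDITION & SPEC =====
-- Pre_ is exactly the inputs on which A returns: every update's two touched indices l and r+1
-- must be valid (possibly negative) Python indices of the length-(n+1) difference array;
-- outside it A raises IndexError.
def Pre_diff_accumulate (n : Int) (lrws : List (Int × Int × Int)) : Prop :=
  ∀ t ∈ lrws, -(n+1) ≤ t.1 ∧ t.1 ≤ n ∧ -(n+1) ≤ t.2.1 + 1 ∧ t.2.1 + 1 ≤ n
instance (n : Int) (lrws : List (Int × Int × Int)) : Decidable (Pre_diff_accumulate n lrws) := by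
  unfold Pre_diff_accumulate; infer_instance

def pvWitness_diff_accumulate : Int × (List (Int × Int × Int)) := (3, [(0, 2, 4), (1, 1, -2)])

def Spec_diff_accumulate (n : Int) (lrws : List (Int × Int × Int)) (out : List Int) : Prop := out = diff_accumulate_alt n lrws
instance (n : Int) (lrws : List (Int × Int × Int)) (out : List Int) : Decidable (Spec_diff_accumulate n lrws out) := by unfold Spec_diff_accumulate; infer_instance

-- ===== CLAIM (what is proved, stated in full; the proofs are below) =====
def Claim_equal_diff_accumulate : Prop := ∀ (n : Int) (lrws : List (Int × Int × Int)), Dom_diff_accumulate n lrws → Pre_diff_accumulate n lrws → Spec_diff_accumulate n lrws (diff_accumulate n lrws)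

-- ===== LEMMAS AND PROOFS =====

-- the difference-array entry accumulated at slot j (m = n + 1 is the array length)
def pvDelta (m : Int) (lrws : List (Int × Int × Int)) (j : Int) : Int :=
  (lrws.map (fun t => (if PySem.Int.mod t.1 m = j then t.2.2 else 0) +
    (if PySem.Int.mod (t.2.1 + 1) m = j then -t.2.2 else 0))).sum

-- prefix sums of a list's first k entries
def pvP (diff : List Int) (k : Nat) : Int :=
  ((List.range k).map (fun j => diff.getD j 0)).sum

theorem pv_getD_set (xs : List Int) (i : Nat) (v : Int) (j : Nat) :
    (xs.set i v).getD j 0 = if j = i ∧ i < xs.length then v else xs.getD j 0 := by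
  simp [List.getD_eq_getElem?_getD, List.getElem?_set]
  split_ifs <;> simp_all

theorem pv_getD_replicate (n j : Nat) : (List.replicate n (0:Int)).getD j 0 = 0 := by
  simp [List.getD_eq_getElem?_getD, List.getElem?_replicate]; split_ifs <;> simp

-- a valid (possibly negative) Python index i of a list of positive length len resolves
-- to the slot (i mod len)
theorem pv_pyIdx_mod (len : Nat) (i : Int) (hpos : 0 < (len:Int))
    (h0 : -(len:Int) ≤ i) (h1 : i < len) :
    PySem.List.pyIdx? len i = some (PySem.Int.mod i len).toNat := by
  rw [PySem.Int.mod_eq_emod_of_pos hpos]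
  simp only [PySem.List.pyIdx?]
  split_ifs with ha
  · have h4 : i % (len:Int) = i := Int.emod_eq_of_lt ha h1
    congr 1; omega
  · have h4 : i % (len:Int) = i + len := by
      calc i % (len:Int) = (i + len) % (len:Int) := (Int.add_emod_right i (len:Int)).symm
        _ = i + len := Int.emod_eq_of_lt (by omega) (by omega)
    congr 1; rw [h4]; omega

theorem pv_pySetD_mod (xs : List Int) (i v : Int) (hpos : 0 < (xs.length:Int))
    (h0 : -(xs.length:Int) ≤ i) (h1 : i < xs.length) :
    PySem.List.pySetD xs i v = xs.set (PySem.Int.mod i xs.length).toNat v := by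
  simp [PySem.List.pySetD, PySem.List.pySet?, pv_pyIdx_mod xs.length i hpos h0 h1]

theorem pv_pyGetD_mod (xs : List Int) (i : Int) (hpos : 0 < (xs.length:Int))
    (h0 : -(xs.length:Int) ≤ i) (h1 : i < xs.length) :
    PySem.List.pyGetD xs i 0 = xs.getD (PySem.Int.mod i xs.length).toNat 0 := by
  simp [PySem.List.pyGetD, PySem.List.pyGet?, pv_pyIdx_mod xs.length i hpos h0 h1,
    List.getD_eq_getElem?_getD]

-- one in-place "xs[i] += w" update, read off at an arbitrary slot j
theorem pv_setAdd (xs : List Int) (i w : Int) (hpos : 0 < (xs.length:Int))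
    (h0 : -(xs.length:Int) ≤ i) (h1 : i < xs.length) (j : Nat) :
    (PySem.List.pySetD xs i (PySem.List.pyGetD xs i 0 + w)).getD j 0 =
      xs.getD j 0 + (if PySem.Int.mod i xs.length = (j:Int) then w else 0) := by
  rw [pv_pySetD_mod xs i _ hpos h0 h1, pv_pyGetD_mod xs i hpos h0 h1, pv_getD_set]
  have hmodlt : PySem.Int.mod i xs.length < (xs.length:Int) := PySem.Int.mod_lt _ hpos
  have hmodnn : 0 ≤ PySem.Int.mod i xs.length := PySem.Int.mod_nonneg _ hpos
  by_cases hj : PySem.Int.mod i xs.length = (j:Int)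
  · have hj1 : j = (PySem.Int.mod i xs.length).toNat := by omega
    rw [if_pos ⟨hj1, by omega⟩, if_pos hj, hj1]
  · rw [if_neg (by rintro ⟨h, _⟩; omega), if_neg hj]; ring

-- A's first loop: the difference array it builds
theorem pv_aDiff : ∀ (lrws : List (Int × Int × Int)) (d : List Int), 0 < (d.length:Int) →
    (∀ t ∈ lrws, -(d.length:Int) ≤ t.1 ∧ t.1 < d.length ∧
      -(d.length:Int) ≤ t.2.1 + 1 ∧ t.2.1 + 1 < d.length) →
    (lrws.foldl (fun diff t =>
      let d1 := PySem.List.pySetD diff t.1 (PySem.List.pyGetD diff t.1 0 + t.2.2)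
      PySem.List.pySetD d1 (t.2.1 + 1) (PySem.List.pyGetD d1 (t.2.1 + 1) 0 - t.2.2)) d).length = d.length ∧
    ∀ j : Nat, (lrws.foldl (fun diff t =>
      let d1 := PySem.List.pySetD diff t.1 (PySem.List.pyGetD diff t.1 0 + t.2.2)
      PySem.List.pySetD d1 (t.2.1 + 1) (PySem.List.pyGetD d1 (t.2.1 + 1) 0 - t.2.2)) d).getD j 0 =
      d.getD j 0 + pvDelta d.length lrws j := by
  intro lrws
  induction lrws with
  | nil => intro d _ _; exact ⟨rfl, fun j => by simp [pvDelta]⟩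
  | cons t ts ih =>
    intro d hpos hpre
    have ht := hpre t (by simp)
    set d1 := PySem.List.pySetD d t.1 (PySem.List.pyGetD d t.1 0 + t.2.2) with hd1
    set d2 := PySem.List.pySetD d1 (t.2.1 + 1) (PySem.List.pyGetD d1 (t.2.1 + 1) 0 - t.2.2) with hd2
    have hlen1 : d1.length = d.length := PySem.List.length_pySetD _ _ _
    have hlen2 : d2.length = d.length := by rw [hd2, PySem.List.length_pySetD, hlen1]
    have hget1 : ∀ j : Nat, d1.getD j 0 =
        d.getD j 0 + (if PySem.Int.mod t.1 d.length = (j:Int) then t.2.2 else 0) :=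
      fun j => pv_setAdd d t.1 t.2.2 hpos (by omega) (by omega) j
    have hget2 : ∀ j : Nat, d2.getD j 0 =
        d1.getD j 0 + (if PySem.Int.mod (t.2.1 + 1) d.length = (j:Int) then -t.2.2 else 0) := by
      intro j
      rw [hd2, sub_eq_add_neg]
      rw [pv_setAdd d1 (t.2.1 + 1) (-t.2.2) (by omega) (by omega) (by omega) j, hlen1]
    have ih' := ih d2 (by omega) (fun u hu => by
      have := hpre u (by simp [hu]); rw [hlen2]; exact this)
    obtain ⟨olen, oget⟩ := ih'
    simp only [List.foldl_cons]
    refine ⟨by rw [← hd1, ← hd2] at *; rw [olen, hlen2], fun j => ?_⟩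
    rw [← hd1, ← hd2] at *
    rw [oget j, hget2 j, hget1 j, hlen2]
    simp only [pvDelta, List.map_cons, List.sum_cons]
    ring

-- A's second loop: the running prefix sum
theorem pv_aPrefix (diff : List Int) : ∀ (m : Nat),
    ((PySem.List.pyRange 0 (m:Int)).foldl (fun (s : List Int × Int) i =>
      let cur := s.2 + PySem.List.pyGetD diff i 0
      (s.1 ++ [cur], cur)) ([], 0)) =
    ((List.range m).map (fun k => pvP diff (k+1)), pvP diff m) := by
  intro m
  induction m with
  | zero =>
    rw [show ((0:Nat):Int) = 0 by rfl, PySem.List.pyRange_one_eq_nil (le_refl 0)]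
    simp [pvP]
  | succ m ih =>
    have hstep : PySem.List.pyRange 0 ((m+1:Nat):Int) = PySem.List.pyRange 0 (m:Int) ++ [(m:Int)] := by
      push_cast
      rw [PySem.List.pyRange_one_succ_right (by omega)]
    rw [hstep, List.foldl_append, ih]
    simp only [List.foldl_cons, List.foldl_nil]
    have hget : PySem.List.pyGetD diff (m:Int) 0 = diff.getD m 0 := by
      rw [PySem.List.pyGetD_of_nonneg _ _ (by omega)]; simp
    have hP : pvP diff (m+1) = pvP diff m + diff.getD m 0 := by
      simp [pvP, List.range_succ]
    rw [hget, List.range_succ, List.map_append]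
    simp [hP]

-- one of B's write passes: a fold of single "ds[f t] += g t" updates, read off at slot j
theorem pv_bFold (f g : Int × Int × Int → Int) :
    ∀ (lrws : List (Int × Int × Int)) (d : List Int), 0 < (d.length:Int) →
    (∀ t ∈ lrws, -(d.length:Int) ≤ f t ∧ f t < d.length) →
    (lrws.foldl (fun ds t =>
      PySem.List.pySetD ds (f t) (PySem.List.pyGetD ds (f t) 0 + g t)) d).length = d.length ∧
    ∀ j : Nat, (lrws.foldl (fun ds t =>
      PySem.List.pySetD ds (f t) (PySem.List.pyGetD ds (f t) 0 + g t)) d).getD j 0 =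
      d.getD j 0 + (lrws.map (fun t => if PySem.Int.mod (f t) d.length = (j:Int) then g t else 0)).sum := by
  intro lrws
  induction lrws with
  | nil => intro d _ _; exact ⟨rfl, fun j => by simp⟩
  | cons t ts ih =>
    intro d hpos hpre
    have ht := hpre t (by simp)
    set d1 := PySem.List.pySetD d (f t) (PySem.List.pyGetD d (f t) 0 + g t) with hd1
    have hlen1 : d1.length = d.length := PySem.List.length_pySetD _ _ _
    have hget1 : ∀ j : Nat, d1.getD j 0 =
        d.getD j 0 + (if PySem.Int.mod (f t) d.length = (j:Int) then g t else 0) :=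
      fun j => pv_setAdd d (f t) (g t) hpos (by omega) (by omega) j
    have ih' := ih d1 (by omega) (fun u hu => by
      have := hpre u (by simp [hu]); rw [hlen1]; exact this)
    obtain ⟨olen, oget⟩ := ih'
    simp only [List.foldl_cons]
    rw [← hd1] at *
    refine ⟨by rw [olen, hlen1], fun j => ?_⟩
    rw [oget j, hget1 j, hlen1]
    simp only [List.map_cons, List.sum_cons]
    ring

-- summing a prefix by taking is summing the first k getD entries
theorem pv_take_sum : ∀ (d : List Int) (k : Nat), (d.take k).sum = pvP d k := by
  intro d
  induction d with
  | nil => intro k; simp [pvP]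
  | cons x d ih =>
    intro k
    cases k with
    | zero => simp [pvP]
    | succ k =>
      simp only [List.take_succ_cons, List.sum_cons, ih k]
      simp [pvP, List.range_succ_eq_map, List.map_map, Function.comp_def, List.getD]

-- adding two guarded sums termwise
theorem pv_sum_add (xs : List (Int × Int × Int)) (f g : Int × Int × Int → Int) :
    (xs.map f).sum + (xs.map g).sum = (xs.map (fun t => f t + g t)).sum := by
  induction xs with
  | nil => simp
  | cons x xs ih => simp only [List.map_cons, List.sum_cons]; rw [← ih]; ring

-- ===== VERDICT (by name: the statement is the Claim_ definition above) =====
theorem diff_accumulate_spec : Claim_equal_diff_accumulate := by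
  intro n lrws _ hpre
  unfold Spec_diff_accumulate diff_accumulate diff_accumulate_alt
  dsimp only
  by_cases hn : 0 ≤ n
  · -- main case
    have hlenD : (List.replicate (n+1).toNat (0:Int)).length = (n+1).toNat := List.length_replicate
    have hposD : 0 < ((List.replicate (n+1).toNat (0:Int)).length : Int) := by rw [hlenD]; omega
    have hm : ((List.replicate (n+1).toNat (0:Int)).length : Int) = n + 1 := by rw [hlenD]; omega
    -- A's difference array
    have hAd := pv_aDiff lrws (List.replicate (n+1).toNat 0) hposD
      (fun t ht => by have := hpre t ht; rw [hlenD]; omega)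
    obtain ⟨hAlen, hAget⟩ := hAd
    set diff := lrws.foldl (fun diff t =>
        let d1 := PySem.List.pySetD diff t.1 (PySem.List.pyGetD diff t.1 0 + t.2.2)
        PySem.List.pySetD d1 (t.2.1 + 1) (PySem.List.pyGetD d1 (t.2.1 + 1) 0 - t.2.2))
      (List.replicate (n+1).toNat 0) with hdiff
    have hAgetz : ∀ j : Nat, diff.getD j 0 = pvDelta (n+1) lrws (j:Int) := by
      intro j; rw [hAget j, pv_getD_replicate, hm]; ring
    -- B's two write passes
    have hB1 := pv_bFold (fun t => t.1) (fun t => t.2.2) lrws (List.replicate (n+1).toNat 0)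
      hposD (fun t ht => by have := hpre t ht; dsimp only; rw [hlenD]; omega)
    obtain ⟨hB1len, hB1get⟩ := hB1
    set ds1 := lrws.foldl (fun ds t =>
        PySem.List.pySetD ds t.1 (PySem.List.pyGetD ds t.1 0 + t.2.2))
      (List.replicate (n+1).toNat 0) with hds1
    have hsub : (fun (ds : List Int) (t : Int × Int × Int) =>
        PySem.List.pySetD ds (t.2.1 + 1) (PySem.List.pyGetD ds (t.2.1 + 1) 0 - t.2.2)) =
        (fun ds t => PySem.List.pySetD ds (t.2.1 + 1) (PySem.List.pyGetD ds (t.2.1 + 1) 0 + -t.2.2)) := by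
      funext ds t; rw [sub_eq_add_neg]
    have hB2 := pv_bFold (fun t => t.2.1 + 1) (fun t => -t.2.2) lrws ds1
      (by rw [hB1len]; exact hposD)
      (fun t ht => by have := hpre t ht; dsimp only; rw [hB1len, hlenD]; omega)
    set ds2 := lrws.foldl (fun ds t =>
        PySem.List.pySetD ds (t.2.1 + 1) (PySem.List.pyGetD ds (t.2.1 + 1) 0 + -t.2.2)) ds1 with hds2
    obtain ⟨hB2len, hB2get⟩ := hB2
    have hBgetz : ∀ j : Nat, ds2.getD j 0 = pvDelta (n+1) lrws (j:Int) := by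
      intro j
      have h1 := hB1get j
      have h2 := hB2get j
      rw [hB1len, hm] at h2
      rw [hm] at h1
      rw [h2, h1, pv_getD_replicate]
      simp only [pvDelta, zero_add]
      exact pv_sum_add lrws _ _
    -- A's accumulation loop
    have hA : ((PySem.List.pyRange 0 n).foldl (fun (s : List Int × Int) i =>
        let cur := s.2 + PySem.List.pyGetD diff i 0
        (s.1 ++ [cur], cur)) ([], 0)).1 = (List.range n.toNat).map (fun k => pvP diff (k+1)) := by
      rw [show n = (n.toNat : Int) by omega, pv_aPrefix diff n.toNat]
      simp only [Int.toNat_natCast]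
    rw [hsub, ← hds2, hA, show n = (n.toNat : Int) by omega, PySem.List.pyRange_zero_natCast, List.map_map]
    apply List.map_congr_left
    intro k _
    simp only [Function.comp]
    -- B's slice sum at position k
    have hslice : PySem.List.slice ds2 none (some ((k:Int) + 1)) = ds2.take (k+1) := by
      rw [PySem.List.slice_to ds2 (by omega), show ((k:Int)+1).toNat = k+1 by omega]
    rw [hslice, pv_take_sum ds2 (k+1)]
    simp only [pvP]
    congr 1
    exact List.map_congr_left (fun j _ => by rw [hAgetz j, hBgetz j])
  · -- n < 0: both sides are the empty list
    rw [PySem.List.pyRange_one_eq_nil (by omega)]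
    rfl
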